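-- pv_equiv track=rewrite | github.com/Maryam-Ah/CHD | app.py | generalize_color_name
-- ===== SOURCE A (Python) =====
-- def generalize_color_name(color_name):
--     color_map = {
--         'blue': ['aliceblue', 'lightcyan', 'lightblue', 'skyblue', 'deepskyblue', 'dodgerblue', 'cornflowerblue', 'royalblue', 'mediumblue', 'darkblue', 'midnightblue', 'navy', 'steelblue', 'cadetblue', 'mediumslateblue', 'slateblue', 'darkslateblue'],
--         'red': ['indianred', 'lightcoral', 'salmon', 'darksalmon', 'lightsalmon', 'crimson', 'red', 'firebrick', 'darkred'],
--         'pink': ['pink', 'lightpink', 'hotpink', 'deeppink', 'mediumvioletred', 'palevioletred'],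
--         'orange': ['coral', 'tomato', 'orangered', 'gold', 'orange', 'darkorange'],
--         'yellow': ['yellow', 'lightyellow', 'lemonchiffon', 'lightgoldenrodyellow', 'papayawhip', 'moccasin', 'peachpuff', 'palegoldenrod', 'khaki', 'darkkhaki'],
--         'green': ['lawngreen', 'chartreuse', 'limegreen', 'lime', 'forestgreen', 'green', 'darkgreen', 'greenyellow', 'yellowgreen', 'springgreen', 'mediumspringgreen', 'lightgreen', 'palegreen', 'darkseagreen', 'mediumseagreen', 'seagreen', 'olive', 'darkolivegreen', 'olivedrab'],
--         'cyan': ['aqua', 'cyan', 'lightcyan', 'paleturquoise', 'aquamarine', 'turquoise', 'mediumturquoise', 'darkturquoise', 'lightseagreen', 'cadetblue', 'darkcyan', 'teal'],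
--         'purple': ['lavender', 'thistle', 'plum', 'violet', 'orchid', 'fuchsia', 'magenta', 'mediumorchid', 'mediumpurple', 'blueviolet', 'darkviolet', 'darkorchid', 'darkmagenta', 'purple', 'indigo'],
--         'brown': ['cornsilk', 'blanchedalmond', 'bisque', 'navajowhite', 'wheat', 'burlywood', 'tan', 'rosybrown', 'sandybrown', 'goldenrod', 'darkgoldenrod', 'peru', 'chocolate', 'saddlebrown', 'sienna', 'brown', 'maroon'],
--         'white': ['white', 'snow', 'honeydew', 'mintcream', 'azure', 'aliceblue', 'ghostwhite', 'whitesmoke', 'seashell', 'beige', 'oldlace', 'floralwhite', 'ivory', 'antiquewhite', 'linen', 'lavenderblush', 'mistyrose'],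
--         # 'gray': ['gainsboro', 'lightgray', 'silver', 'darkgray', 'gray', 'dimgray', 'lightslategray', 'slategray', 'darkslategray', 'black']
--     }
--     for general_color, specific_colors in color_map.items():
--         if color_name in specific_colors:
--             return general_color
--     return color_name
-- ===== SOURCE B (Python) =====
-- # Flat reverse table written directly (first category wins for duplicate names,
-- # matching the original first-match scan); lookup is a single dict get.
-- _GENERAL = {
--     'aliceblue': 'blue',
--     'lightcyan': 'blue',
--     'lightblue': 'blue',
--     'skyblue': 'blue',
--     'deepskyblue': 'blue',
--     'dodgerblue': 'blue',
--     'cornflowerblue': 'blue',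
--     'royalblue': 'blue',
--     'mediumblue': 'blue',
--     'darkblue': 'blue',
--     'midnightblue': 'blue',
--     'navy': 'blue',
--     'steelblue': 'blue',
--     'cadetblue': 'blue',
--     'mediumslateblue': 'blue',
--     'slateblue': 'blue',
--     'darkslateblue': 'blue',
--     'indianred': 'red',
--     'lightcoral': 'red',
--     'salmon': 'red',
--     'darksalmon': 'red',
--     'lightsalmon': 'red',
--     'crimson': 'red',
--     'red': 'red',
--     'firebrick': 'red',
--     'darkred': 'red',
--     'pink': 'pink',
--     'lightpink': 'pink',
--     'hotpink': 'pink',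
--     'deeppink': 'pink',
--     'mediumvioletred': 'pink',
--     'palevioletred': 'pink',
--     'coral': 'orange',
--     'tomato': 'orange',
--     'orangered': 'orange',
--     'gold': 'orange',
--     'orange': 'orange',
--     'darkorange': 'orange',
--     'yellow': 'yellow',
--     'lightyellow': 'yellow',
--     'lemonchiffon': 'yellow',
--     'lightgoldenrodyellow': 'yellow',
--     'papayawhip': 'yellow',
--     'moccasin': 'yellow',
--     'peachpuff': 'yellow',
--     'palegoldenrod': 'yellow',
--     'khaki': 'yellow',
--     'darkkhaki': 'yellow',
--     'lawngreen': 'green',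
--     'chartreuse': 'green',
--     'limegreen': 'green',
--     'lime': 'green',
--     'forestgreen': 'green',
--     'green': 'green',
--     'darkgreen': 'green',
--     'greenyellow': 'green',
--     'yellowgreen': 'green',
--     'springgreen': 'green',
--     'mediumspringgreen': 'green',
--     'lightgreen': 'green',
--     'palegreen': 'green',
--     'darkseagreen': 'green',
--     'mediumseagreen': 'green',
--     'seagreen': 'green',
--     'olive': 'green',
--     'darkolivegreen': 'green',
--     'olivedrab': 'green',
--     'aqua': 'cyan',
--     'cyan': 'cyan',
--     'paleturquoise': 'cyan',
--     'aquamarine': 'cyan',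
--     'turquoise': 'cyan',
--     'mediumturquoise': 'cyan',
--     'darkturquoise': 'cyan',
--     'lightseagreen': 'cyan',
--     'darkcyan': 'cyan',
--     'teal': 'cyan',
--     'lavender': 'purple',
--     'thistle': 'purple',
--     'plum': 'purple',
--     'violet': 'purple',
--     'orchid': 'purple',
--     'fuchsia': 'purple',
--     'magenta': 'purple',
--     'mediumorchid': 'purple',
--     'mediumpurple': 'purple',
--     'blueviolet': 'purple',
--     'darkviolet': 'purple',
--     'darkorchid': 'purple',
--     'darkmagenta': 'purple',
--     'purple': 'purple',
--     'indigo': 'purple',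
--     'cornsilk': 'brown',
--     'blanchedalmond': 'brown',
--     'bisque': 'brown',
--     'navajowhite': 'brown',
--     'wheat': 'brown',
--     'burlywood': 'brown',
--     'tan': 'brown',
--     'rosybrown': 'brown',
--     'sandybrown': 'brown',
--     'goldenrod': 'brown',
--     'darkgoldenrod': 'brown',
--     'peru': 'brown',
--     'chocolate': 'brown',
--     'saddlebrown': 'brown',
--     'sienna': 'brown',
--     'brown': 'brown',
--     'maroon': 'brown',
--     'white': 'white',
--     'snow': 'white',
--     'honeydew': 'white',
--     'mintcream': 'white',
--     'azure': 'white',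
--     'ghostwhite': 'white',
--     'whitesmoke': 'white',
--     'seashell': 'white',
--     'beige': 'white',
--     'oldlace': 'white',
--     'floralwhite': 'white',
--     'ivory': 'white',
--     'antiquewhite': 'white',
--     'linen': 'white',
--     'lavenderblush': 'white',
--     'mistyrose': 'white',
-- }
--
--
-- def generalize_color_name(color_name):
--     return _GENERAL.get(color_name, color_name)
-- ===== Notes on version B (the rewrite author's own statement) =====
-- stated objective: idiomatic
-- what changed: Replaces the nested category->list-of-names structure and per-call membership scan with a flat name->category table written directly (first category kept for duplicate names, preserving A's first-match tie-break) and a single dict get with the input as default.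
import Mathlib
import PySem

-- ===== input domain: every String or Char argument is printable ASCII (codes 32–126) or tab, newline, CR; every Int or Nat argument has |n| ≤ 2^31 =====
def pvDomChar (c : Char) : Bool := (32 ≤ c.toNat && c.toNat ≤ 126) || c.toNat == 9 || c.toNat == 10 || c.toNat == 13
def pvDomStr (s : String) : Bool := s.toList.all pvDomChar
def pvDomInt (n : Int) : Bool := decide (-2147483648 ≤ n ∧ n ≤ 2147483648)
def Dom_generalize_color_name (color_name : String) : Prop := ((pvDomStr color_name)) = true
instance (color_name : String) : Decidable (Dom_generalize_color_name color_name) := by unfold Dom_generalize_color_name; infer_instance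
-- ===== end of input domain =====

-- B replaces the nested category→names map and membership scan with a flat
-- name→category table and one lookup (objective: idiomatic).

-- ===== PORT A =====
-- the dict literal of A, as an assoc list in insertion order
def pvColorMapA : List (String × List String) :=
  [("blue", ["aliceblue", "lightcyan", "lightblue", "skyblue", "deepskyblue", "dodgerblue", "cornflowerblue", "royalblue", "mediumblue", "darkblue", "midnightblue", "navy", "steelblue", "cadetblue", "mediumslateblue", "slateblue", "darkslateblue"]),
  ("red", ["indianred", "lightcoral", "salmon", "darksalmon", "lightsalmon", "crimson", "red", "firebrick", "darkred"]),
  ("pink", ["pink", "lightpink", "hotpink", "deeppink", "mediumvioletred", "palevioletred"]),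
  ("orange", ["coral", "tomato", "orangered", "gold", "orange", "darkorange"]),
  ("yellow", ["yellow", "lightyellow", "lemonchiffon", "lightgoldenrodyellow", "papayawhip", "moccasin", "peachpuff", "palegoldenrod", "khaki", "darkkhaki"]),
  ("green", ["lawngreen", "chartreuse", "limegreen", "lime", "forestgreen", "green", "darkgreen", "greenyellow", "yellowgreen", "springgreen", "mediumspringgreen", "lightgreen", "palegreen", "darkseagreen", "mediumseagreen", "seagreen", "olive", "darkolivegreen", "olivedrab"]),
  ("cyan", ["aqua", "cyan", "lightcyan", "paleturquoise", "aquamarine", "turquoise", "mediumturquoise", "darkturquoise", "lightseagreen", "cadetblue", "darkcyan", "teal"]),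
  ("purple", ["lavender", "thistle", "plum", "violet", "orchid", "fuchsia", "magenta", "mediumorchid", "mediumpurple", "blueviolet", "darkviolet", "darkorchid", "darkmagenta", "purple", "indigo"]),
  ("brown", ["cornsilk", "blanchedalmond", "bisque", "navajowhite", "wheat", "burlywood", "tan", "rosybrown", "sandybrown", "goldenrod", "darkgoldenrod", "peru", "chocolate", "saddlebrown", "sienna", "brown", "maroon"]),
  ("white", ["white", "snow", "honeydew", "mintcream", "azure", "aliceblue", "ghostwhite", "whitesmoke", "seashell", "beige", "oldlace", "floralwhite", "ivory", "antiquewhite", "linen", "lavenderblush", "mistyrose"])]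

-- 'for general_color, specific_colors in color_map.items(): if color_name in specific_colors: return general_color; return color_name'
def pvScanA (color_name : String) : List (String × List String) → String
  | [] => color_name
  | (general_color, specific_colors) :: rest =>
      if specific_colors.contains color_name then general_color
      else pvScanA color_name rest

def generalize_color_name (color_name : String) : String :=
  pvScanA color_name pvColorMapA

-- ===== PORT B =====
-- B: the '_GENERAL' dict literal of Source B, a flat name→category table (keys distinct,
-- first category kept for duplicate names), as an assoc list in insertion order
def pvGeneralTable : List (String × String) :=
  [("aliceblue", "blue"),
   ("lightcyan", "blue"),
   ("lightblue", "blue"),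
   ("skyblue", "blue"),
   ("deepskyblue", "blue"),
   ("dodgerblue", "blue"),
   ("cornflowerblue", "blue"),
   ("royalblue", "blue"),
   ("mediumblue", "blue"),
   ("darkblue", "blue"),
   ("midnightblue", "blue"),
   ("navy", "blue"),
   ("steelblue", "blue"),
   ("cadetblue", "blue"),
   ("mediumslateblue", "blue"),
   ("slateblue", "blue"),
   ("darkslateblue", "blue"),
   ("indianred", "red"),
   ("lightcoral", "red"),
   ("salmon", "red"),
   ("darksalmon", "red"),
   ("lightsalmon", "red"),
   ("crimson", "red"),
   ("red", "red"),
   ("firebrick", "red"),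
   ("darkred", "red"),
   ("pink", "pink"),
   ("lightpink", "pink"),
   ("hotpink", "pink"),
   ("deeppink", "pink"),
   ("mediumvioletred", "pink"),
   ("palevioletred", "pink"),
   ("coral", "orange"),
   ("tomato", "orange"),
   ("orangered", "orange"),
   ("gold", "orange"),
   ("orange", "orange"),
   ("darkorange", "orange"),
   ("yellow", "yellow"),
   ("lightyellow", "yellow"),
   ("lemonchiffon", "yellow"),
   ("lightgoldenrodyellow", "yellow"),
   ("papayawhip", "yellow"),
   ("moccasin", "yellow"),
   ("peachpuff", "yellow"),
   ("palegoldenrod", "yellow"),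
   ("khaki", "yellow"),
   ("darkkhaki", "yellow"),
   ("lawngreen", "green"),
   ("chartreuse", "green"),
   ("limegreen", "green"),
   ("lime", "green"),
   ("forestgreen", "green"),
   ("green", "green"),
   ("darkgreen", "green"),
   ("greenyellow", "green"),
   ("yellowgreen", "green"),
   ("springgreen", "green"),
   ("mediumspringgreen", "green"),
   ("lightgreen", "green"),
   ("palegreen", "green"),
   ("darkseagreen", "green"),
   ("mediumseagreen", "green"),
   ("seagreen", "green"),
   ("olive", "green"),
   ("darkolivegreen", "green"),
   ("olivedrab", "green"),
   ("aqua", "cyan"),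
   ("cyan", "cyan"),
   ("paleturquoise", "cyan"),
   ("aquamarine", "cyan"),
   ("turquoise", "cyan"),
   ("mediumturquoise", "cyan"),
   ("darkturquoise", "cyan"),
   ("lightseagreen", "cyan"),
   ("darkcyan", "cyan"),
   ("teal", "cyan"),
   ("lavender", "purple"),
   ("thistle", "purple"),
   ("plum", "purple"),
   ("violet", "purple"),
   ("orchid", "purple"),
   ("fuchsia", "purple"),
   ("magenta", "purple"),
   ("mediumorchid", "purple"),
   ("mediumpurple", "purple"),
   ("blueviolet", "purple"),
   ("darkviolet", "purple"),
   ("darkorchid", "purple"),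
   ("darkmagenta", "purple"),
   ("purple", "purple"),
   ("indigo", "purple"),
   ("cornsilk", "brown"),
   ("blanchedalmond", "brown"),
   ("bisque", "brown"),
   ("navajowhite", "brown"),
   ("wheat", "brown"),
   ("burlywood", "brown"),
   ("tan", "brown"),
   ("rosybrown", "brown"),
   ("sandybrown", "brown"),
   ("goldenrod", "brown"),
   ("darkgoldenrod", "brown"),
   ("peru", "brown"),
   ("chocolate", "brown"),
   ("saddlebrown", "brown"),
   ("sienna", "brown"),
   ("brown", "brown"),
   ("maroon", "brown"),
   ("white", "white"),
   ("snow", "white"),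
   ("honeydew", "white"),
   ("mintcream", "white"),
   ("azure", "white"),
   ("ghostwhite", "white"),
   ("whitesmoke", "white"),
   ("seashell", "white"),
   ("beige", "white"),
   ("oldlace", "white"),
   ("floralwhite", "white"),
   ("ivory", "white"),
   ("antiquewhite", "white"),
   ("linen", "white"),
   ("lavenderblush", "white"),
   ("mistyrose", "white")]

-- 'return _GENERAL.get(color_name, color_name)' — dict get = first-match lookup (keys are distinct)
def generalize_color_name_alt (color_name : String) : String :=
  match pvGeneralTable.find? (fun p => p.1 == color_name) with
  | some p => p.2
  | none => color_name

-- ===== PRECONDITION & SPEC =====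
def Spec_generalize_color_name (color_name : String) (out : String) : Prop := out = generalize_color_name_alt color_name
instance (color_name : String) (out : String) : Decidable (Spec_generalize_color_name color_name out) := by unfold Spec_generalize_color_name; infer_instance

-- ===== CLAIM (what is proved, stated in full; the proofs are below) =====
def Claim_equal_generalize_color_name : Prop := ∀ (color_name : String), Dom_generalize_color_name color_name → Spec_generalize_color_name color_name (generalize_color_name color_name)

-- ===== LEMMAS AND PROOFS =====

-- all specific color names A ever matches against
def pvAllNames : List String := pvColorMapA.flatMap Prod.snd

-- on every known name, the two ports agree (finite check)
set_option maxRecDepth 4096 in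
theorem pv_agree_on_names : ∀ x ∈ pvAllNames, generalize_color_name x = generalize_color_name_alt x := by decide

-- every key of B's flat table is a known name
set_option maxRecDepth 4096 in
theorem pv_keys_sub : ∀ x ∈ pvGeneralTable.map Prod.fst, x ∈ pvAllNames := by decide

-- A's scan returns the input unchanged when no list contains it
theorem pv_scanA_miss (c : String) (L : List (String × List String))
    (h : ∀ p ∈ L, c ∉ p.2) : pvScanA c L = c := by
  induction L with
  | nil => rfl
  | cons p rest ih =>
      obtain ⟨g, sc⟩ := p
      have hns : c ∉ sc := h (g, sc) (List.mem_cons_self ..)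
      simp [pvScanA, hns]
      exact ih fun q hq => h q (List.mem_cons_of_mem _ hq)

theorem pv_spec (c : String) : generalize_color_name c = generalize_color_name_alt c := by
  by_cases hc : c ∈ pvAllNames
  · exact pv_agree_on_names c hc
  · have hA : generalize_color_name c = c := by
      unfold generalize_color_name
      refine pv_scanA_miss c pvColorMapA fun p hp hm => hc ?_
      exact List.mem_flatMap.mpr ⟨p, hp, hm⟩
    have hB : generalize_color_name_alt c = c := by
      unfold generalize_color_name_alt
      have hfind : pvGeneralTable.find? (fun p => p.1 == c) = none := by
        refine List.find?_eq_none.mpr fun p hp => ?_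
        simp only [beq_iff_eq]
        exact fun he => hc (pv_keys_sub c (he ▸ List.mem_map_of_mem hp))
      rw [hfind]
    rw [hA, hB]

-- ===== VERDICT (by name: the statement is the Claim_ definition above) =====
theorem generalize_color_name_spec : Claim_equal_generalize_color_name := by
  intro c _
  exact pv_spec c
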